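-- pv_equiv track=rewrite | github.com/Rescuwu/AOC-2024 | day4/Main.py | Part1_pattern_cords
-- ===== SOURCE A (Python) =====
-- def Part1_pattern_cords(s,y=0,x=0):
--     l=[]
--     for i in range(-1,2):
--         for j in range(-1,2):
--             if i==j:
--                 #continue
--                 pass
--             if ((0==i) and (0==j)):
--                 continue
--             temp=[]
--             for k in range(len(s)):
--                 temp.append([y+k*i,x+k*j])
--             l.append(temp)
--     return l
-- ===== SOURCE B (Python) =====
-- def Part1_pattern_cords(s, y=0, x=0):
--     # radius-major sweep: 8 running cursors, one per direction, advanced incrementally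
--     dirs = [(-1, -1), (-1, 0), (-1, 1), (0, -1), (0, 1), (1, -1), (1, 0), (1, 1)]
--     cursors = [[y, x] for _ in dirs]
--     results = [[] for _ in dirs]
--     for _ in range(len(s)):
--         for d, (i, j) in enumerate(dirs):
--             results[d].append(cursors[d][:])
--             cursors[d][0] += i
--             cursors[d][1] += j
--     return results
-- ===== Notes on version B (the rewrite author's own statement) =====
-- stated objective: alternative
-- what changed: Replaced A's direction-major nested loops with k*i/k*j multiplications by a radius-major sweep that keeps 8 running cursors (one per direction) and advances each by its step every iteration, appending a copy per step.
import Mathlib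
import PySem

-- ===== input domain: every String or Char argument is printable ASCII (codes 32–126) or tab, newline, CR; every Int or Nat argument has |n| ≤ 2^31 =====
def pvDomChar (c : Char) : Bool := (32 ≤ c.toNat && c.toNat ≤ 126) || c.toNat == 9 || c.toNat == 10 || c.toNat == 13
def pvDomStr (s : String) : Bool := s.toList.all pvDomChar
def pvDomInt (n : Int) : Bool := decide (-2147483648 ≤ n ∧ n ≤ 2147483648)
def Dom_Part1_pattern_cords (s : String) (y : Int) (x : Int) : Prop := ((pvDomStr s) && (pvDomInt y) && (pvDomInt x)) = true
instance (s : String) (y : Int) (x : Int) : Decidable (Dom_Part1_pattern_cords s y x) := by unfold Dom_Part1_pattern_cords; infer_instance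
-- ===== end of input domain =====

-- B differs from A by a radius-major sweep with 8 running cursors instead of
-- direction-major nested loops with k*i multiplication (objective: alternative).

-- ===== PORT A =====
def Part1_pattern_cords (s : String) (y : Int) (x : Int) : List (List (List Int)) :=
  (PySem.List.pyRange (-1) 2 1).foldl (fun l i =>
    (PySem.List.pyRange (-1) 2 1).foldl (fun l j =>
      -- `if i==j: pass` in A is a no-op
      if i == 0 && j == 0 then l
      else
        l ++ [(PySem.List.pyRange 0 (PySem.Str.len s) 1).foldl
                (fun temp k => temp ++ [[y + k * i, x + k * j]]) []]) l) []

-- ===== PORT B =====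
-- one sweep step: for each direction, append a copy of its cursor, then advance it
def pvStepB (e : Int × Int × Int × Int × List (List Int)) :
    Int × Int × Int × Int × List (List Int) :=
  (e.1 + e.2.2.1, e.2.1 + e.2.2.2.1, e.2.2.1, e.2.2.2.1, e.2.2.2.2 ++ [[e.1, e.2.1]])

def pvDirsB : List (Int × Int) :=
  [(-1, -1), (-1, 0), (-1, 1), (0, -1), (0, 1), (1, -1), (1, 0), (1, 1)]

def Part1_pattern_cords_alt (s : String) (y : Int) (x : Int) : List (List (List Int)) :=
  let init := pvDirsB.map (fun d => (y, x, d.1, d.2, ([] : List (List Int))))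
  let final := (PySem.List.pyRange 0 (PySem.Str.len s) 1).foldl
    (fun st _ => st.map pvStepB) init
  final.map (fun e => e.2.2.2.2)

-- ===== PRECONDITION & SPEC =====
def Spec_Part1_pattern_cords (s : String) (y : Int) (x : Int) (out : List (List (List Int))) : Prop := out = Part1_pattern_cords_alt s y x
instance (s : String) (y : Int) (x : Int) (out : List (List (List Int))) : Decidable (Spec_Part1_pattern_cords s y x out) := by unfold Spec_Part1_pattern_cords; infer_instance

-- ===== CLAIM (what is proved, stated in full; the proofs are below) =====
def Claim_equal_Part1_pattern_cords : Prop := ∀ (s : String) (y : Int) (x : Int), Dom_Part1_pattern_cords s y x → Spec_Part1_pattern_cords s y x (Part1_pattern_cords s y x)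

-- ===== LEMMAS AND PROOFS =====

-- an appending fold is init ++ map
theorem pv_foldl_append_map {α : Type} (L : List α) (f : α → List Int) :
    ∀ acc : List (List Int),
      L.foldl (fun t k => t ++ [f k]) acc = acc ++ L.map f := by
  induction L with
  | nil => intro acc; simp
  | cons a L ih => intro acc; simp [List.foldl, ih]

theorem pv_range_m1_2 : PySem.List.pyRange (-1) 2 1 = [-1, 0, 1] := by decide

-- closed form of one direction's coordinate list
def pvDirList (y x i j : Int) (m : Nat) : List (List Int) :=
  (List.range m).map (fun (k : Nat) => [y + (k : Int) * i, x + (k : Int) * j])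

theorem pvDirList_succ (y x i j : Int) (m : Nat) :
    pvDirList y x i j (m + 1)
      = pvDirList y x i j m ++ [[y + (m : Int) * i, x + (m : Int) * j]] := by
  simp [pvDirList, List.range_succ]

-- A's inner loop computes the closed form
theorem pv_inner_A (y x i j : Int) (m : Nat) :
    List.foldl (fun temp (k : Nat) => temp ++ [[y + (k : Int) * i, x + (k : Int) * j]])
      [] (List.range m) = pvDirList y x i j m := by
  rw [pv_foldl_append_map, List.nil_append]; rfl

-- invariant of B's sweep: after m steps each direction holds its cursor at radius m
-- and its list of the first m coordinates
theorem pv_sweep_B (y x : Int) (m : Nat) (ds : List (Int × Int)) :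
    (List.range m).foldl (fun st _ => st.map pvStepB)
        (ds.map (fun d => (y, x, d.1, d.2, ([] : List (List Int)))))
      = ds.map (fun d =>
          (y + m * d.1, x + m * d.2, d.1, d.2, pvDirList y x d.1 d.2 m)) := by
  induction m with
  | zero => simp [pvDirList]
  | succ m ih =>
    rw [List.range_succ, List.foldl_append, ih]
    simp only [List.foldl_cons, List.foldl_nil, List.map_map]
    apply List.map_congr_left
    intro d _
    simp only [Function.comp, pvStepB, pvDirList_succ, Prod.mk.injEq]
    push_cast; ring_nf; exact ⟨trivial, trivial, trivial⟩

theorem pv_len_cast (s : String) : PySem.Str.len s = ((s.toList.length : Nat) : Int) := by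
  simp

-- ===== VERDICT (by name: the statement is the Claim_ definition above) =====
theorem Part1_pattern_cords_spec : Claim_equal_Part1_pattern_cords := by
  intro s y x _
  unfold Spec_Part1_pattern_cords Part1_pattern_cords Part1_pattern_cords_alt
  rw [pv_len_cast, PySem.List.pyRange_zero_nat]
  simp only [List.foldl_map]
  rw [pv_sweep_B]
  simp only [pv_range_m1_2, pvDirsB, List.foldl_cons, List.foldl_nil,
    List.map_cons, List.map_nil, pv_inner_A]
  norm_num
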